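-- pv_equiv track=rewrite | github.com/sami-bg/stable-SSL | stable_pretraining/cli.py | _needs_multirun
-- ===== SOURCE A (Python) =====
-- from typing import List, Optional
--
-- def _needs_multirun(overrides: List[str]) -> bool:
--     """Detect if multirun mode is needed."""
--     if not overrides:
--         return False
--
--     overrides_str = " ".join(overrides)
--
--     return (
--         "--multirun" in overrides
--         or "-m" in overrides
--         or "hydra/launcher=" in overrides_str
--         or "hydra.sweep" in overrides_str
--         or any("=" in o and "," in o.split("=", 1)[1] for o in overrides if "=" in o)
--     )
-- ===== SOURCE B (Python) =====
-- _FLAGS = {"--multirun", "-m"}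
--
--
-- def _needs_multirun(overrides):
--     """Detect if multirun mode is needed."""
--     if _FLAGS & set(overrides):
--         return True
--     return any(_forces_multirun(o) for o in overrides)
--
--
-- def _forces_multirun(o):
--     # One character-level scan of o: detects the fixed patterns
--     # "hydra/launcher=" / "hydra.sweep" starting at any position, and a ','
--     # occurring after the first '=' (a sweep value list).
--     seen_eq = False
--     for i, ch in enumerate(o):
--         if ch == "h" and (
--             o.startswith("hydra/launcher=", i) or o.startswith("hydra.sweep", i)
--         ):
--             return True
--         if not seen_eq:
--             if ch == "=":
--                 seen_eq = True
--         elif ch == ",":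
--             return True
--     return False
-- ===== Notes on version B (the rewrite author's own statement) =====
-- stated objective: alternative
-- what changed: Replaces the space-join plus whole-string substring scans and the split("=",1)-based comma test by a set intersection for the two flags and a single character-level state-machine scan per override that matches the fixed patterns in place and tracks comma-after-first-'=' with a flag; no joined string and no split lists are ever built.
import Mathlib
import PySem

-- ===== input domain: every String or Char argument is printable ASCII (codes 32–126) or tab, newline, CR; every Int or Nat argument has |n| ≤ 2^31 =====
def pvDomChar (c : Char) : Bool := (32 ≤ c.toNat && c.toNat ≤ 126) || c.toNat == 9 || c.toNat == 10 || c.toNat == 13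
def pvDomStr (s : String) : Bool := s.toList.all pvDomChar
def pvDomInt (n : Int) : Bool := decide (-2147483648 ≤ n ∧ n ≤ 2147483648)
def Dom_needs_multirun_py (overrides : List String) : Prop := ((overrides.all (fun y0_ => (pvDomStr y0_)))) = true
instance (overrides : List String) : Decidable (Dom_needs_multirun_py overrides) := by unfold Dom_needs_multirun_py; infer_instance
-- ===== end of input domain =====

-- B replaces A's join + repeated whole-string/whole-list scans and split-based comma
-- test by a set intersection for the flags plus ONE character-level state-machine scan
-- per override (patterns matched in place, comma-after-first-'=' tracked by a flag);
-- alternative decomposition, same asymptotic cost.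

-- ===== PORT A =====
-- literal port of _needs_multirun: empty check, space-join, then the big disjunction.
-- (PySem.List.pyGet? ... ).getD "" ports parts[1]; the default is unreachable because the
-- generator's filter guarantees "=" ∈ o, hence at least two split parts.
def needs_multirun_py (overrides : List String) : Bool :=
  if overrides = [] then false
  else
    let overrides_str := PySem.Str.join " " overrides
    overrides.contains "--multirun"
    || overrides.contains "-m"
    || PySem.Str.isIn "hydra/launcher=" overrides_str
    || PySem.Str.isIn "hydra.sweep" overrides_str
    || (overrides.filter (fun o => PySem.Str.isIn "=" o)).any (fun o =>
         PySem.Str.isIn "=" o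
         && PySem.Str.isIn "," ((PySem.List.pyGet? ((PySem.Str.splitMax? o "=" 1).getD []) 1).getD ""))

-- ===== PORT B =====
-- literal port of Source B.
-- module constant _FLAGS = {"--multirun", "-m"}
def pvFlags : PySem.Set String := PySem.Set.ofList ["--multirun", "-m"]

-- the for-loop of _forces_multirun: current suffix of the string + the seen_eq flag;
-- o.startswith(pat, i) is exactly PySem.Chars.startswith applied to the i-th suffix.
def forcesScan : List Char → Bool → Bool
  | [], _ => false
  | c :: rest, seenEq =>
    if c == 'h' && (PySem.Chars.startswith (c :: rest) "hydra/launcher=".toList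
                    || PySem.Chars.startswith (c :: rest) "hydra.sweep".toList) then true
    else if !seenEq then
      (if c == '=' then forcesScan rest true else forcesScan rest false)
    else if c == ',' then true
    else forcesScan rest true

def forcesMultirun (o : String) : Bool := forcesScan o.toList false

def needs_multirun_py_alt (overrides : List String) : Bool :=
  if PySem.Set.inter pvFlags (PySem.Set.ofList overrides) ≠ [] then true
  else overrides.any forcesMultirun

-- ===== PRECONDITION & SPEC =====
def Spec_needs_multirun_py (overrides : List String) (out : Bool) : Prop := out = needs_multirun_py_alt overrides
instance (overrides : List String) (out : Bool) : Decidable (Spec_needs_multirun_py overrides out) := by unfold Spec_needs_multirun_py; infer_instance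

-- ===== CLAIM (what is proved, stated in full; the proofs are below) =====
def Claim_equal_needs_multirun_py : Prop := ∀ (overrides : List String), Dom_needs_multirun_py overrides → Spec_needs_multirun_py overrides (needs_multirun_py overrides)

-- ===== LEMMAS AND PROOFS =====

-- "a ',' strictly after the first '='" — the comma condition both programs test.
def CommaAfterEq (cs : List Char) : Prop := ∃ a b, cs = a ++ '=' :: b ∧ '=' ∉ a ∧ ',' ∈ b

theorem CAE_nil : ¬ CommaAfterEq [] := by
  rintro ⟨a, b, heq, -, -⟩
  exact absurd heq.symm (List.append_ne_nil_of_right_ne_nil a (by simp))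

theorem CAE_eq_cons (rest : List Char) : CommaAfterEq ('=' :: rest) ↔ ',' ∈ rest := by
  constructor
  · rintro ⟨a, b, heq, hna, hc⟩
    cases a with
    | nil => simp at heq; subst heq; exact hc
    | cons x a' =>
      simp at heq
      simp at hna
      exact absurd heq.1 hna.1
  · intro h; exact ⟨[], rest, rfl, by simp, h⟩

theorem CAE_cons_ne {c : Char} (hc : c ≠ '=') (rest : List Char) :
    CommaAfterEq (c :: rest) ↔ CommaAfterEq rest := by
  constructor
  · rintro ⟨a, b, heq, hna, hcm⟩
    cases a with
    | nil => simp at heq; exact absurd heq.1 hc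
    | cons x a' =>
      simp at heq
      exact ⟨a', b, heq.2, fun h => hna (List.mem_cons_of_mem _ h), hcm⟩
  · rintro ⟨a, b, heq, hna, hcm⟩
    exact ⟨c :: a, b, by rw [heq]; rfl, by simp [hna]; exact fun h => hc h.symm, hcm⟩

theorem prefix_head {p pt : List Char} {x : Char} (hp : p = x :: pt) {c : Char} {cs : List Char}
    (h : p <+: c :: cs) : c = x := by
  subst hp
  obtain ⟨t, ht⟩ := h
  simp at ht
  exact ht.1.symm

theorem forcesScan_spec (cs : List Char) (seenEq : Bool) :
    forcesScan cs seenEq = true ↔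
      ("hydra/launcher=".toList <:+: cs ∨ "hydra.sweep".toList <:+: cs ∨
       (if seenEq then ',' ∈ cs else CommaAfterEq cs)) := by
  induction cs generalizing seenEq with
  | nil =>
    cases seenEq <;> simp [forcesScan, List.infix_nil, CAE_nil]
  | cons c rest ih =>
    rw [forcesScan]
    by_cases h1 : (c == 'h' && (PySem.Chars.startswith (c :: rest) "hydra/launcher=".toList
                    || PySem.Chars.startswith (c :: rest) "hydra.sweep".toList)) = true
    · rw [if_pos h1]
      simp only [Bool.and_eq_true, Bool.or_eq_true, beq_iff_eq] at h1
      rcases h1.2 with hs | hs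
      · exact iff_of_true rfl (Or.inl (List.infix_cons_iff.mpr
          (Or.inl ((PySem.Chars.startswith_iff _ _).mp hs))))
      · exact iff_of_true rfl (Or.inr (Or.inl (List.infix_cons_iff.mpr
          (Or.inl ((PySem.Chars.startswith_iff _ _).mp hs)))))
    · rw [if_neg h1]
      simp only [Bool.and_eq_true, Bool.or_eq_true, beq_iff_eq, not_and, not_or] at h1
      have hnp1 : ¬ ("hydra/launcher=".toList <+: c :: rest) := by
        intro hp
        have hc : c = 'h' := prefix_head (show "hydra/launcher=".toList = 'h' :: "ydra/launcher=".toList by decide) hp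
        exact (h1 hc).1 ((PySem.Chars.startswith_iff _ _).mpr hp)
      have hnp2 : ¬ ("hydra.sweep".toList <+: c :: rest) := by
        intro hp
        have hc : c = 'h' := prefix_head (show "hydra.sweep".toList = 'h' :: "ydra.sweep".toList by decide) hp
        exact (h1 hc).2 ((PySem.Chars.startswith_iff _ _).mpr hp)
      rw [List.infix_cons_iff, List.infix_cons_iff]
      have hrw1 : ("hydra/launcher=".toList <+: c :: rest ∨ "hydra/launcher=".toList <:+: rest)
          ↔ "hydra/launcher=".toList <:+: rest := by tauto
      have hrw2 : ("hydra.sweep".toList <+: c :: rest ∨ "hydra.sweep".toList <:+: rest)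
          ↔ "hydra.sweep".toList <:+: rest := by tauto
      rw [hrw1, hrw2]
      cases seenEq with
      | false =>
        rw [if_pos (show (!false) = true from rfl),
            if_neg (show ¬(false = true) from by decide)]
        by_cases hce : c = '='
        · subst hce
          rw [if_pos (show (('=' == '=') : Bool) = true from rfl), ih true,
              if_pos (show true = true from rfl), CAE_eq_cons]
        · rw [if_neg (show ¬((c == '=') = true) from by simp [hce]), ih false,
              if_neg (show ¬(false = true) from by decide), CAE_cons_ne hce]
      | true =>
        rw [if_neg (show ¬((!true) = true) from by decide),
            if_pos (show true = true from rfl)]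
        by_cases hcc : c = ','
        · subst hcc
          rw [if_pos (show ((',' == ',') : Bool) = true from rfl)]
          simp
        · rw [if_neg (show ¬((c == ',') = true) from by simp [hcc]), ih true,
              if_pos (show true = true from rfl)]
          have h2 : ¬ (',' = c) := fun h => hcc h.symm
          simp [List.mem_cons, h2]

theorem go_m0 (fuel : Nat) (l cur : List Char) (acc : List (List Char)) :
    PySem.Chars.splitOnMax.go ['='] fuel 0 l cur acc = ((cur.reverse ++ l) :: acc).reverse := by
  cases fuel with
  | zero => rfl
  | succ f => cases l with
    | nil => simp [PySem.Chars.splitOnMax.go]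
    | cons c rest => simp [PySem.Chars.splitOnMax.go]

theorem go_eq (a : List Char) : ∀ (fuel : Nat) (b cur : List Char) (acc : List (List Char)),
    '=' ∉ a → a.length < fuel →
    PySem.Chars.splitOnMax.go ['='] fuel 1 (a ++ '=' :: b) cur acc
      = ((cur.reverse ++ a) :: acc).reverse ++ [b] := by
  induction a with
  | nil =>
    intro fuel b cur acc _ hf
    cases fuel with
    | zero => omega
    | succ f =>
      rw [List.nil_append, PySem.Chars.splitOnMax.go]
      simp only [List.isPrefixOf, beq_self_eq_true, Bool.true_and]
      norm_num
      rw [go_m0]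
      simp
  | cons c a' ih =>
    intro fuel b cur acc ha hf
    cases fuel with
    | zero => omega
    | succ f =>
      have hc : ¬ (('=' == c) = true) := by simp; intro h; exact ha (by simp; exact Or.inl h)
      rw [List.cons_append, PySem.Chars.splitOnMax.go]
      simp only [List.isPrefixOf, hc, Bool.false_and]
      rw [ih f b (c :: cur) acc (fun h => ha (List.mem_cons_of_mem _ h)) (by simp at hf ⊢; omega)]
      simp

theorem first_eq_unique : ∀ (a a' b b' : List Char), a ++ '=' :: b = a' ++ '=' :: b' →
    '=' ∉ a → '=' ∉ a' → a = a' ∧ b = b' := by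
  intro a
  induction a with
  | nil =>
    intro a' b b' h _ ha'
    cases a' with
    | nil => simp_all
    | cons x t => simp at h; exact absurd h.1 (by simp at ha'; exact ha'.1)
  | cons c t ih =>
    intro a' b b' h ha ha'
    cases a' with
    | nil =>
      simp at h
      exact absurd h.1 (by intro hh; exact ha (by simp [hh]))
    | cons x t' =>
      simp at h
      obtain ⟨h1, h2⟩ := h
      obtain ⟨ht, hb⟩ := ih t' b b' h2 (fun hh => ha (List.mem_cons_of_mem _ hh))
        (fun hh => ha' (List.mem_cons_of_mem _ hh))
      exact ⟨by simp [h1, ht], hb⟩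


theorem commaTest_iff (o : String) :
    (PySem.Str.isIn "=" o
      && PySem.Str.isIn "," ((PySem.List.pyGet? ((PySem.Str.splitMax? o "=" 1).getD []) 1).getD "")) = true
    ↔ CommaAfterEq o.toList := by
  have heqL : ("=" : String).toList = ['='] := by decide
  have hIn : (PySem.Str.isIn "=" o) = true ↔ '=' ∈ o.toList := by
    rw [PySem.Str.isIn_iff_infix, heqL, List.singleton_infix_iff]
  by_cases hm : '=' ∈ o.toList
  · obtain ⟨k, hk⟩ := Option.isSome_iff_exists.mp ((PySem.List.index?_isSome_iff _ _).mpr hm)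
    obtain ⟨pre, suf, ho, -, hnp⟩ := (PySem.List.index?_eq_some_iff _ _ _).mp hk
    have hsplit : PySem.Str.splitMax? o "=" 1 = some [String.ofList pre, String.ofList suf] := by
      rw [PySem.Str.splitMax?, heqL]
      rw [show PySem.Chars.splitMax? o.toList ['='] 1 = some (PySem.Chars.splitOnMax o.toList ['='] 1) from by
        simp [PySem.Chars.splitMax?]]
      rw [show PySem.Chars.splitOnMax o.toList ['='] 1
            = PySem.Chars.splitOnMax.go ['='] (o.toList.length + 1) 1 o.toList [] [] from by
        simp [PySem.Chars.splitOnMax]]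
      rw [ho, go_eq pre ((pre ++ '=' :: suf).length + 1) suf [] [] hnp (by simp)]
      simp
    rw [hsplit]
    simp only [Option.getD_some]
    rw [show PySem.List.pyGet? [String.ofList pre, String.ofList suf] 1 = some (String.ofList suf) from by
      simp [PySem.List.pyGet?, PySem.List.pyIdx?]]
    simp only [Option.getD_some]
    have hIn2 : (PySem.Str.isIn "," (String.ofList suf)) = true ↔ ',' ∈ suf := by
      rw [PySem.Str.isIn_iff_infix, show ("," : String).toList = [','] from by decide,
          String.toList_ofList, List.singleton_infix_iff]
    rw [Bool.and_eq_true, hIn, hIn2]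
    constructor
    · rintro ⟨-, hcm⟩
      exact ⟨pre, suf, ho, hnp, hcm⟩
    · rintro ⟨a, b, hab, hna, hcm⟩
      obtain ⟨rfl, rfl⟩ := first_eq_unique a pre b suf (by rw [← hab, ← ho]) hna hnp
      exact ⟨hm, hcm⟩
  · refine iff_of_false ?_ ?_
    · rw [Bool.and_eq_true]
      rintro ⟨h1, -⟩
      exact hm (hIn.mp h1)
    · rintro ⟨a, b, hab, -, -⟩
      exact hm (by rw [hab]; simp)


-- An infix without the separator character of `a ++ c :: b` lies wholly in `a` or in `b`.
theorem infix_append_cons {l a b : List Char} {c : Char} (hc : c ∉ l)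
    (h : l <:+: a ++ c :: b) : l <:+: a ∨ l <:+: b := by
  obtain ⟨s, t, hst⟩ := h
  have htot := congrArg List.length hst
  simp at htot
  by_cases h1 : s.length + l.length ≤ a.length
  · left
    have hp : s ++ l <+: a := by
      apply List.prefix_of_prefix_length_le (l₃ := a ++ c :: b)
      · exact ⟨t, by simpa [List.append_assoc] using hst⟩
      · exact ⟨c :: b, rfl⟩
      · simpa using h1
    obtain ⟨t2, ht2⟩ := hp
    exact ⟨s, t2, by simpa [List.append_assoc] using ht2⟩
  · by_cases h2 : a.length + 1 ≤ s.length
    · right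
      have hs : l ++ t <:+ c :: b := by
        refine List.suffix_of_suffix_length_le (l₃ := a ++ c :: b) ?_ ?_ ?_
        · exact ⟨s, by simpa [List.append_assoc] using hst⟩
        · exact ⟨a, rfl⟩
        · simp; omega
      rcases List.suffix_cons_iff.mp hs with heq | hs'
      · exfalso
        have hlen : (l ++ t).length = (c :: b).length := by rw [heq]
        simp at hlen
        apply hc
        have hcm : c ∈ l ++ t := by rw [heq]; exact List.mem_cons_self
        rcases List.mem_append.mp hcm with h | h
        · exact h
        · exfalso; omega
      · obtain ⟨s2, hs2⟩ := hs'
        exact ⟨s2, t, by simpa [List.append_assoc] using hs2⟩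
    · exfalso
      apply hc
      have hidx : a.length - s.length < l.length := by omega
      have hlt : a.length < (s ++ (l ++ t)).length := by simp; omega
      have hval : (s ++ (l ++ t))[a.length]'hlt = c := by
        have h0 : (a ++ c :: b)[a.length]'(by simp) = c := by
          simp [List.getElem_append_right]
        have hre : s ++ (l ++ t) = a ++ c :: b := by
          simpa [List.append_assoc] using hst
        simp only [hre]
        exact h0
      rw [List.getElem_append_right (by omega)] at hval
      rw [List.getElem_append_left (by omega)] at hval
      exact hval ▸ List.getElem_mem _

-- Every part is an infix of the join.
theorem infix_join {sep cs : List Char} {css : List (List Char)} (h : cs ∈ css) :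
    cs <:+: sep.intercalate css := by
  induction css with
  | nil => cases h
  | cons x r ih =>
    cases r with
    | nil => simp at h; subst h; simp [List.intercalate]
    | cons y r' =>
      have hrec : sep.intercalate (x :: y :: r') = x ++ sep ++ sep.intercalate (y :: r') := by
        simp [List.intercalate]
      rw [hrec]
      rcases List.mem_cons.mp h with h | h
      · subst h; exact ⟨[], sep ++ sep.intercalate (y :: r'), by simp⟩
      · exact (ih h).trans ⟨x ++ sep, [], by simp⟩

-- A space-free pattern occurs in the space-join iff it occurs in some element.
theorem infix_join_iff {l : List Char} {css : List (List Char)} (hc : ' ' ∉ l)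
    (hne : css ≠ []) : l <:+: [' '].intercalate css ↔ ∃ cs ∈ css, l <:+: cs := by
  constructor
  · intro h
    induction css with
    | nil => exact absurd rfl hne
    | cons x r ih =>
      cases r with
      | nil => exact ⟨x, by simp, by simpa [List.intercalate] using h⟩
      | cons y r' =>
        have hrec : [' '].intercalate (x :: y :: r') = x ++ ' ' :: [' '].intercalate (y :: r') := by
          simp [List.intercalate]
        rw [hrec] at h
        rcases infix_append_cons hc h with h | h
        · exact ⟨x, by simp, h⟩
        · obtain ⟨cs, hm, hi⟩ := ih (by simp) h
          exact ⟨cs, List.mem_cons_of_mem _ hm, hi⟩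
  · rintro ⟨cs, hm, hi⟩
    exact hi.trans (infix_join hm)

theorem str_isIn_join {pat : String} (hc : ' ' ∉ pat.toList) {xs : List String} (hne : xs ≠ []) :
    PySem.Str.isIn pat (PySem.Str.join " " xs) = xs.any (fun o => PySem.Str.isIn pat o) := by
  rw [Bool.eq_iff_iff, PySem.Str.isIn_iff_infix, PySem.Str.toList_join, List.any_eq_true]
  rw [show PySem.Chars.join (" " : String).toList (xs.map String.toList)
        = [' '].intercalate (xs.map String.toList) from rfl]
  rw [infix_join_iff hc (by simpa using hne)]
  constructor
  · rintro ⟨cs, hm, hi⟩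
    obtain ⟨o, ho, rfl⟩ := List.mem_map.mp hm
    exact ⟨o, ho, (PySem.Str.isIn_iff_infix _ _).mpr hi⟩
  · rintro ⟨o, ho, hi⟩
    exact ⟨o.toList, List.mem_map.mpr ⟨o, ho, rfl⟩, (PySem.Str.isIn_iff_infix _ _).mp hi⟩

theorem forcesMultirun_iff (o : String) :
    forcesMultirun o = true ↔
      ("hydra/launcher=".toList <:+: o.toList ∨ "hydra.sweep".toList <:+: o.toList ∨
       CommaAfterEq o.toList) := by
  rw [forcesMultirun, forcesScan_spec, if_neg (show ¬(false = true) from by decide)]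

theorem inter_flags_iff (ov : List String) :
    PySem.Set.inter pvFlags (PySem.Set.ofList ov) ≠ [] ↔
      ("--multirun" ∈ ov ∨ "-m" ∈ ov) := by
  rw [show pvFlags = ["--multirun", "-m"] from rfl, PySem.Set.inter]
  rw [Ne, List.filter_eq_nil_iff]
  simp [PySem.Set.contains, List.contains_eq_mem, PySem.Set.mem_ofList]
  tauto

theorem exists_mem_or3 (l : List String) (p q r : String → Prop) :
    (∃ x ∈ l, p x ∨ q x ∨ r x) ↔ (∃ x ∈ l, p x) ∨ (∃ x ∈ l, q x) ∨ (∃ x ∈ l, r x) := by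
  constructor
  · rintro ⟨x, hx, (h | h | h)⟩
    · exact Or.inl ⟨x, hx, h⟩
    · exact Or.inr (Or.inl ⟨x, hx, h⟩)
    · exact Or.inr (Or.inr ⟨x, hx, h⟩)
  · rintro (⟨x, hx, h⟩ | ⟨x, hx, h⟩ | ⟨x, hx, h⟩)
    · exact ⟨x, hx, Or.inl h⟩
    · exact ⟨x, hx, Or.inr (Or.inl h)⟩
    · exact ⟨x, hx, Or.inr (Or.inr h)⟩

theorem alt_iff (ov : List String) :
    needs_multirun_py_alt ov = true ↔
      (("--multirun" ∈ ov ∨ "-m" ∈ ov) ∨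
       ∃ o ∈ ov, ("hydra/launcher=".toList <:+: o.toList ∨ "hydra.sweep".toList <:+: o.toList ∨
                  CommaAfterEq o.toList)) := by
  rw [needs_multirun_py_alt]
  by_cases hI : PySem.Set.inter pvFlags (PySem.Set.ofList ov) ≠ []
  · rw [if_pos hI]
    exact iff_of_true rfl (Or.inl ((inter_flags_iff ov).mp hI))
  · rw [if_neg hI]
    rw [List.any_eq_true]
    have hnf : ¬ ("--multirun" ∈ ov ∨ "-m" ∈ ov) := fun h => hI ((inter_flags_iff ov).mpr h)
    constructor
    · rintro ⟨o, ho, h⟩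
      exact Or.inr ⟨o, ho, (forcesMultirun_iff o).mp h⟩
    · rintro (h | ⟨o, ho, h⟩)
      · exact absurd h hnf
      · exact ⟨o, ho, (forcesMultirun_iff o).mpr h⟩

theorem a_iff (ov : List String) (hne : ov ≠ []) :
    needs_multirun_py ov = true ↔
      (("--multirun" ∈ ov ∨ "-m" ∈ ov) ∨
       ∃ o ∈ ov, ("hydra/launcher=".toList <:+: o.toList ∨ "hydra.sweep".toList <:+: o.toList ∨
                  CommaAfterEq o.toList)) := by
  rw [needs_multirun_py, if_neg hne]
  simp only [str_isIn_join (by decide : ' ' ∉ ("hydra/launcher=" : String).toList) hne,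
             str_isIn_join (by decide : ' ' ∉ ("hydra.sweep" : String).toList) hne,
             List.any_filter, Bool.and_self_left]
  simp only [Bool.or_eq_true, List.any_eq_true, List.contains_eq_mem, decide_eq_true_eq]
  rw [exists_mem_or3 ov
      (fun o => "hydra/launcher=".toList <:+: o.toList)
      (fun o => "hydra.sweep".toList <:+: o.toList)
      (fun o => CommaAfterEq o.toList)]
  constructor
  · rintro ((((h | h) | ⟨o, ho, h⟩) | ⟨o, ho, h⟩) | ⟨o, ho, h⟩)
    · exact Or.inl (Or.inl h)
    · exact Or.inl (Or.inr h)
    · exact Or.inr (Or.inl ⟨o, ho, (PySem.Str.isIn_iff_infix _ _).mp h⟩)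
    · exact Or.inr (Or.inr (Or.inl ⟨o, ho, (PySem.Str.isIn_iff_infix _ _).mp h⟩))
    · exact Or.inr (Or.inr (Or.inr ⟨o, ho, (commaTest_iff o).mp h⟩))
  · rintro ((h | h) | (⟨o, ho, h⟩ | ⟨o, ho, h⟩ | ⟨o, ho, h⟩))
    · exact Or.inl (Or.inl (Or.inl (Or.inl h)))
    · exact Or.inl (Or.inl (Or.inl (Or.inr h)))
    · exact Or.inl (Or.inl (Or.inr ⟨o, ho, (PySem.Str.isIn_iff_infix _ _).mpr h⟩))
    · exact Or.inl (Or.inr ⟨o, ho, (PySem.Str.isIn_iff_infix _ _).mpr h⟩)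
    · exact Or.inr ⟨o, ho, (commaTest_iff o).mpr h⟩

-- ===== VERDICT (by name: the statement is the Claim_ definition above) =====
theorem needs_multirun_py_spec : Claim_equal_needs_multirun_py := by
  intro ov _
  unfold Spec_needs_multirun_py
  rcases eq_or_ne ov [] with rfl | hne
  · decide
  · rw [Bool.eq_iff_iff, a_iff ov hne, alt_iff ov]
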